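-- pv_equiv track=rewrite | github.com/sdsd08013/cpp | src/metrics_lib.py | path_is_clear
-- ===== SOURCE A (Python) =====
-- def path_is_clear(path, failed_links):
--     '''Return true if path and failed_links are disjoint.
--
--     @param path: list of nodes
--     @param failed_links: list of (src, dst) node pairs
--     '''
--     failed_links_set = set(failed_links)
--     path_links_set = set([])
--     for i, path_node in enumerate(path):
--         if i != len(path) - 1:
--             path_links_set.add((path_node, path[i + 1]))
--             path_links_set.add((path[i + 1], path_node))
--
--     # Path is clear if no intersection.
--     return len(path_links_set.intersection(failed_links_set)) == 0
-- ===== SOURCE B (Python) =====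
-- # B inverts the iteration: index the path's node positions once, then scan failed_links
-- # and test each failed link against the path's neighborhood; no set of failed links and
-- # no set of path edges is built.
-- def path_is_clear(path, failed_links):
--     '''Return true if path and failed_links are disjoint.
--
--     @param path: list of nodes
--     @param failed_links: list of (src, dst) node pairs
--     '''
--     pos = {}
--     for i, node in enumerate(path):
--         pos.setdefault(node, []).append(i)
--     n = len(path)
--     for u, v in failed_links:
--         for i in pos.get(u, ()):
--             if (i + 1 < n and path[i + 1] == v) or (i > 0 and path[i - 1] == v):
--                 return False
--     return True
-- ===== Notes on version B (the rewrite author's own statement) =====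
-- stated objective: alternative
-- what changed: B inverts the iteration: instead of building a set of failed links and a set of path edges and intersecting them, it builds a positions index (node -> list of indices) over the path once, then scans failed_links and checks each link against the path's neighborhood at those positions, returning False on the first hit.
import Mathlib
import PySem

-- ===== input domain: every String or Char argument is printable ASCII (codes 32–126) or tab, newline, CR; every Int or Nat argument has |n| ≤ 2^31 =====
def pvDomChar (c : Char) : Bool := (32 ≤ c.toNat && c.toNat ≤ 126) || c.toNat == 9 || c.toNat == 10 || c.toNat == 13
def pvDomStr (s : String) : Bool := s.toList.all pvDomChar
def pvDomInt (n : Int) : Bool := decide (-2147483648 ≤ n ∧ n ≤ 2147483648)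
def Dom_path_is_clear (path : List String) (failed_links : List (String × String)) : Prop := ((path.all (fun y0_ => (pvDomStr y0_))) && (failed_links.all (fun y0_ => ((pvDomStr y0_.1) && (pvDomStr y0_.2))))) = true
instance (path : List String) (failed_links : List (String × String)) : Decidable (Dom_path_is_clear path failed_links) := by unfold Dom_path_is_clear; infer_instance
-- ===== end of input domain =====

-- B inverts the iteration: it indexes the path's node positions once, then scans failed_links and tests each link against the path's neighborhood — no failed-links set and no path-edge set are built (alternative decomposition, similar cost).


-- ===== PORT A =====
def path_is_clear (path : List String) (failed_links : List (String × String)) : Bool :=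
  let failed_links_set : PySem.Set (String × String) := PySem.Set.ofList failed_links
  let path_links_set : PySem.Set (String × String) :=
    (PySem.List.enumerate path).foldl
      (fun s p =>
        if p.1 ≠ (path.length : Int) - 1 then
          PySem.Set.add (PySem.Set.add s (p.2, PySem.List.pyGetD path (p.1 + 1) ""))
            (PySem.List.pyGetD path (p.1 + 1) "", p.2)
        else s)
      PySem.Set.empty
  PySem.Set.len (PySem.Set.inter path_links_set failed_links_set) == 0

-- ===== PORT B =====
def path_is_clear_alt (path : List String) (failed_links : List (String × String)) : Bool :=
  let pos : PySem.Dict String (List Int) :=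
    (PySem.List.enumerate path).foldl
      (fun d p => PySem.Dict.modify d p.2 [] (· ++ [p.1])) PySem.Dict.empty
  let n : Int := (path.length : Int)
  -- 'for u, v in failed_links: for i in pos.get(u, ()): if …: return False' / 'return True'
  !(failed_links.any (fun uv =>
      (PySem.Dict.getD pos uv.1 []).any (fun i =>
        (decide (i + 1 < n) && (PySem.List.pyGetD path (i + 1) "" == uv.2)) ||
        (decide (0 < i) && (PySem.List.pyGetD path (i - 1) "" == uv.2)))))

-- ===== PRECONDITION & SPEC =====
def Spec_path_is_clear (path : List String) (failed_links : List (String × String)) (out : Bool) : Prop := out = path_is_clear_alt path failed_links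
instance (path : List String) (failed_links : List (String × String)) (out : Bool) : Decidable (Spec_path_is_clear path failed_links out) := by unfold Spec_path_is_clear; infer_instance

-- ===== CLAIM (what is proved, stated in full; the proofs are below) =====
def Claim_equal_path_is_clear : Prop := ∀ (path : List String) (failed_links : List (String × String)), Dom_path_is_clear path failed_links → Spec_path_is_clear path failed_links (path_is_clear path failed_links)

-- ===== LEMMAS AND PROOFS =====

-- Membership in A's path-edge fold: exactly the adjacent pairs (both orientations) from index m on.
lemma mem_pathfold (path : List String) :
    ∀ (l : List String) (m : Nat) (s : PySem.Set (String × String)),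
      path.drop m = l →
      ∀ y, (y ∈ (PySem.List.enumerate l (m : Int)).foldl
          (fun s p =>
            if p.1 ≠ (path.length : Int) - 1 then
              PySem.Set.add (PySem.Set.add s (p.2, PySem.List.pyGetD path (p.1 + 1) ""))
                (PySem.List.pyGetD path (p.1 + 1) "", p.2)
            else s) s ↔
        y ∈ s ∨ ∃ i : Nat, m ≤ i ∧ i + 1 < path.length ∧
          (y = (path.getD i "", path.getD (i+1) "") ∨ y = (path.getD (i+1) "", path.getD i ""))) := by
  intro l
  induction l with
  | nil =>
    intro m s hdrop y
    have hlen : path.length ≤ m := by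
      have := congrArg List.length hdrop
      simp at this; omega
    simp [PySem.List.enumerate_nil]
    intro i hmi hi
    omega
  | cons a l ih =>
    intro m s hdrop y
    have hm : m < path.length := by
      have := congrArg List.length hdrop
      simp at this; omega
    have ha : path.getD m "" = a := by
      have h0 : (path.drop m).getD 0 "" = a := by rw [hdrop]; rfl
      simpa [List.getD, List.getElem?_drop] using h0
    have hdrop' : path.drop (m+1) = l := by
      have : (path.drop m).drop 1 = l := by rw [hdrop]; rfl
      simpa [List.drop_drop, Nat.add_comm] using this
    rw [PySem.List.enumerate_cons]
    simp only [List.foldl_cons]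
    have hcast : ((m : Int) + 1) = ((m + 1 : Nat) : Int) := by push_cast; ring
    by_cases hend : (m : Int) = (path.length : Int) - 1
    · have hcond : ¬ ((m : Int) ≠ (path.length : Int) - 1) := by simpa using hend
      rw [if_neg hcond, hcast, ih (m+1) s hdrop' y]
      constructor
      · rintro (hs | ⟨i, hi1, hi2, hi3⟩)
        · exact Or.inl hs
        · exact Or.inr ⟨i, by omega, hi2, hi3⟩
      · rintro (hs | ⟨i, hi1, hi2, hi3⟩)
        · exact Or.inl hs
        · exfalso; omega
    · have hm1 : m + 1 < path.length := by omega
      rw [if_pos hend, hcast, PySem.List.pyGetD_natCast,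
        ih (m+1) _ hdrop' y, PySem.Set.mem_add, PySem.Set.mem_add]
      constructor
      · rintro (((hs | h1) | h2) | ⟨i, hi1, hi2, hi3⟩)
        · exact Or.inl hs
        · exact Or.inr ⟨m, le_refl m, hm1, Or.inl (by rw [ha]; exact h1)⟩
        · exact Or.inr ⟨m, le_refl m, hm1, Or.inr (by rw [ha]; exact h2)⟩
        · exact Or.inr ⟨i, by omega, hi2, hi3⟩
      · rintro (hs | ⟨i, hi1, hi2, hi3⟩)
        · exact Or.inl (Or.inl (Or.inl hs))
        · rcases Nat.eq_or_lt_of_le hi1 with rfl | hlt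
          · rcases hi3 with h | h
            · exact Or.inl (Or.inl (Or.inr (by rw [ha] at h; exact h)))
            · exact Or.inl (Or.inr (by rw [ha] at h; exact h))
          · exact Or.inr ⟨i, by omega, hi2, hi3⟩

-- A returns true iff no adjacent pair (in either orientation) occurs in failed_links.
lemma A_iff (path : List String) (failed_links : List (String × String)) :
    path_is_clear path failed_links = true ↔
      ∀ i : Nat, i + 1 < path.length →
        (path.getD i "", path.getD (i+1) "") ∉ failed_links ∧
        (path.getD (i+1) "", path.getD i "") ∉ failed_links := by
  unfold path_is_clear
  simp only [beq_iff_eq]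
  have hlen : ∀ (t : PySem.Set (String × String)), PySem.Set.len t = 0 ↔ t = [] := by
    intro t
    constructor
    · intro h
      apply List.eq_nil_iff_length_eq_zero.mpr
      simpa [PySem.Set.len] using h
    · intro h; simp [h, PySem.Set.len]
  rw [hlen]
  rw [List.eq_nil_iff_forall_not_mem]
  have hfold := mem_pathfold path path 0 PySem.Set.empty (by simp)
  constructor
  · intro h i hi
    constructor
    · intro hmem
      exact h _ ((PySem.Set.mem_inter _ _ _).mpr
        ⟨(hfold _).mpr (Or.inr ⟨i, Nat.zero_le i, hi, Or.inl rfl⟩),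
         (PySem.Set.mem_ofList _ _).mpr hmem⟩)
    · intro hmem
      exact h _ ((PySem.Set.mem_inter _ _ _).mpr
        ⟨(hfold _).mpr (Or.inr ⟨i, Nat.zero_le i, hi, Or.inr rfl⟩),
         (PySem.Set.mem_ofList _ _).mpr hmem⟩)
  · intro h y hy
    rcases (PySem.Set.mem_inter _ _ _).mp hy with ⟨hy1, hy2⟩
    rcases (hfold y).mp hy1 with hs | ⟨i, _, hi2, hi3⟩
    · simp [PySem.Set.empty] at hs
    · have hy2' := (PySem.Set.mem_ofList _ _).mp hy2
      rcases hi3 with rfl | rfl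
      · exact (h i hi2).1 hy2'
      · exact (h i hi2).2 hy2'

-- B's positions index: i ∈ pos[u] iff i is an index of an occurrence of u in path.
lemma pos_mem (path : List String) (u : String) (i : Int) :
    i ∈ PySem.Dict.getD
        ((PySem.List.enumerate path).foldl
          (fun d p => PySem.Dict.modify d p.2 [] (· ++ [p.1])) PySem.Dict.empty) u [] ↔
      ∃ k : Nat, k < path.length ∧ path.getD k "" = u ∧ i = (k : Int) := by
  have hswap : (PySem.List.enumerate path).foldl
      (fun d p => PySem.Dict.modify d p.2 [] (· ++ [p.1])) PySem.Dict.empty =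
    ((PySem.List.enumerate path).map Prod.swap).foldl
      (fun d q => PySem.Dict.modify d q.1 [] (· ++ [q.2])) PySem.Dict.empty := by
    rw [List.foldl_map]
    rfl
  rw [hswap, PySem.Dict.getD_foldl_modify_append]
  simp only [PySem.Dict.getD_empty, List.nil_append, List.mem_map, List.mem_filter,
    List.mem_map, beq_iff_eq]
  constructor
  · rintro ⟨q, ⟨⟨p, hp, rfl⟩, hq1⟩, rfl⟩
    rcases (PySem.List.mem_enumerate_iff _ _ _).mp hp with ⟨k, hk, rfl⟩
    exact ⟨k, hk, by simpa [List.getD_eq_getElem?_getD, List.getElem?_eq_getElem hk] using hq1,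
      by simp [Prod.swap]⟩
  · rintro ⟨k, hk, hu, rfl⟩
    refine ⟨(path[k], (k : Int)), ⟨⟨((k : Int), path[k]), ?_, rfl⟩, ?_⟩, rfl⟩
    · exact (PySem.List.mem_enumerate_iff _ _ _).mpr ⟨k, hk, by simp⟩
    · simpa [List.getD_eq_getElem?_getD, List.getElem?_eq_getElem hk] using hu

-- B returns true iff no adjacent pair (in either orientation) occurs in failed_links.
lemma B_iff (path : List String) (failed_links : List (String × String)) :
    path_is_clear_alt path failed_links = true ↔
      ∀ i : Nat, i + 1 < path.length →
        (path.getD i "", path.getD (i+1) "") ∉ failed_links ∧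
        (path.getD (i+1) "", path.getD i "") ∉ failed_links := by
  unfold path_is_clear_alt
  rw [Bool.not_eq_eq_eq_not, Bool.not_true, ← Bool.not_eq_true, List.any_eq_true]
  constructor
  · intro h k hk
    constructor
    · intro hin
      apply h
      refine ⟨(path.getD k "", path.getD (k+1) ""), hin, ?_⟩
      rw [List.any_eq_true]
      refine ⟨(k : Int), (pos_mem path _ _).mpr ⟨k, by omega, rfl, rfl⟩, ?_⟩
      have hc : ((k : Int) + 1) = ((k + 1 : Nat) : Int) := by push_cast; ring
      rw [Bool.or_eq_true, Bool.and_eq_true, hc, PySem.List.pyGetD_natCast]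
      exact Or.inl ⟨by simp; omega, by simp⟩
    · intro hin
      apply h
      refine ⟨(path.getD (k+1) "", path.getD k ""), hin, ?_⟩
      rw [List.any_eq_true]
      refine ⟨((k + 1 : Nat) : Int), (pos_mem path _ _).mpr ⟨k + 1, by omega, rfl, rfl⟩, ?_⟩
      have hc : (((k + 1 : Nat) : Int) - 1) = ((k : Nat) : Int) := by push_cast; ring
      rw [Bool.or_eq_true, Bool.and_eq_true, Bool.and_eq_true, hc, PySem.List.pyGetD_natCast]
      exact Or.inr ⟨by simp, by simp⟩
  · rintro h ⟨uv, huv, hany⟩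
    rw [List.any_eq_true] at hany
    obtain ⟨i, hi, hcond⟩ := hany
    rcases (pos_mem path uv.1 i).mp hi with ⟨k, hk, hu, rfl⟩
    rw [Bool.or_eq_true, Bool.and_eq_true, Bool.and_eq_true] at hcond
    rcases hcond with ⟨h1, h2⟩ | ⟨h1, h2⟩
    · have hk1 : k + 1 < path.length := by
        have := of_decide_eq_true h1; omega
      have hc : ((k : Int) + 1) = ((k + 1 : Nat) : Int) := by push_cast; ring
      rw [hc, PySem.List.pyGetD_natCast, beq_iff_eq] at h2
      have : uv = (path.getD k "", path.getD (k+1) "") := by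
        apply Prod.ext <;> simp [← hu, ← h2]
      exact (h k hk1).1 (this ▸ huv)
    · have hk0 : 0 < k := by have := of_decide_eq_true h1; omega
      obtain ⟨j, rfl⟩ : ∃ j : Nat, k = j + 1 := ⟨k - 1, by omega⟩
      have hc : (((j + 1 : Nat) : Int) - 1) = ((j : Nat) : Int) := by push_cast; ring
      rw [hc, PySem.List.pyGetD_natCast, beq_iff_eq] at h2
      have : uv = (path.getD (j+1) "", path.getD j "") := by
        apply Prod.ext <;> simp [← hu, ← h2]
      exact (h j (by omega)).2 (this ▸ huv)

-- ===== VERDICT (by name: the statement is the Claim_ definition above) =====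
theorem path_is_clear_spec : Claim_equal_path_is_clear := by
  intro path failed_links _
  unfold Spec_path_is_clear
  exact Bool.coe_iff_coe.mp ((A_iff path failed_links).trans (B_iff path failed_links).symm)
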